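-- pv_equiv track=rewrite | github.com/flyfatty/leetcode | bfs-dfs/1162.py | maxDistanceByBFS
-- ===== SOURCE A (Python) =====
-- from typing import List
--
-- def maxDistanceByBFS(grid: List[List[int]]) -> int:
--     def is_valid(x, y):
--         return 0 <= x < m and 0 <= y < n
--
--     directs = [(1, 0), (0, 1), (-1, 0), (0, -1)]
--     m, n = len(grid), len(grid[0])
--     q = []
--     visit = set()
--     for i in range(m):
--         for j in range(n):
--             if grid[i][j] == 1:
--                 q.append((i, j))
--                 visit.add((i, j))
--     step = 0
--     while q:
--         size = len(q)
--         for _ in range(size):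
--             x, y = q.pop(0)
--             for sx, sy in directs:
--                 x_, y_ = x + sx, y + sy
--                 if is_valid(x_, y_) and (x_, y_) not in visit:
--                     visit.add((x_, y_))
--                     q.append((x_, y_))
--         step += 1
--     return step - 1 if step > 1 else -1
-- ===== SOURCE B (Python) =====
-- from typing import List
--
-- def maxDistanceByBFS(grid: List[List[int]]) -> int:
--     m, n = len(grid), len(grid[0])
--     land = [(i, j) for i in range(m) for j in range(n) if grid[i][j] == 1]
--     best = -1
--     for i in range(m):
--         for j in range(n):
--             if grid[i][j] != 1:
--                 d = min((abs(i - a) + abs(j - b) for a, b in land), default=-1)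
--                 if d > best:
--                     best = d
--     return best
-- ===== Notes on version B (the rewrite author's own statement) =====
-- stated objective: alternative
-- what changed: Replaces the multi-source BFS with a queue and visited set by a direct arithmetic computation: since the grid has no obstacles, the BFS distance of a water cell is exactly its minimum Manhattan distance to any land cell, so B collects the land cells once and returns the maximum over water cells of that closed-form distance (-1 when there is no land or no water).
import Mathlib
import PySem

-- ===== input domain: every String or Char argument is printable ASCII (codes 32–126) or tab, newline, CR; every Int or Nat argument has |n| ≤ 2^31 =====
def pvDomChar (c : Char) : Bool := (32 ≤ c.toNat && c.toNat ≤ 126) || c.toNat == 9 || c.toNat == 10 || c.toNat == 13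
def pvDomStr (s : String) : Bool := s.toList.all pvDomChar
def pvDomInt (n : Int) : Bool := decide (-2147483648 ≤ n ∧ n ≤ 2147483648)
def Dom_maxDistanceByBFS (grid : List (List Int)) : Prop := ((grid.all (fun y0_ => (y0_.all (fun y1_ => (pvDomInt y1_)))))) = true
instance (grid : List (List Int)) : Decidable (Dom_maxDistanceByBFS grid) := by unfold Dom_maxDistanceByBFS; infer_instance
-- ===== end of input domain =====

-- B replaces A's queue-based multi-source BFS by the closed-form maximum over water
-- cells of the minimum Manhattan distance to a land cell (same value; alternative algorithm).


-- ===== PORT A =====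
-- grid[i][j] (indices always in range under Pre_, so the total default form is exact)
def pvGridAt (grid : List (List Int)) (i j : Int) : Int :=
  PySem.List.pyGetD (PySem.List.pyGetD grid i []) j 0

def pvDirects : List (Int × Int) := [(1, 0), (0, 1), (-1, 0), (0, -1)]

def pvIsValid (m n x y : Int) : Bool :=
  decide (0 ≤ x) && decide (x < m) && decide (0 ≤ y) && decide (y < n)

-- the initial double loop building q and visit
def pvInitA (grid : List (List Int)) (m n : Int) :
    List (Int × Int) × PySem.Set (Int × Int) :=
  (PySem.List.pyRange 0 m 1).foldl (fun st i =>
    (PySem.List.pyRange 0 n 1).foldl (fun st j =>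
      if pvGridAt grid i j == 1 then (st.1 ++ [(i, j)], PySem.Set.add st.2 (i, j)) else st)
      st)
    ([], PySem.Set.empty)

-- one neighbour test/push of the inner 'for sx, sy in directs' body
def pvNbrStep (m n : Int) (x : Int × Int)
    (st : List (Int × Int) × PySem.Set (Int × Int)) (d : Int × Int) :
    List (Int × Int) × PySem.Set (Int × Int) :=
  let c := (x.1 + d.1, x.2 + d.2)
  if pvIsValid m n c.1 c.2 && !(PySem.Set.contains st.2 c) then
    (st.1 ++ [c], PySem.Set.add st.2 c)
  else st

-- one round of the while loop: pop all 'size' cells, collecting the next queue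
def pvRound (m n : Int) (q : List (Int × Int)) (visit : PySem.Set (Int × Int)) :
    List (Int × Int) × PySem.Set (Int × Int) :=
  q.foldl (fun st x => pvDirects.foldl (pvNbrStep m n x) st) ([], visit)

-- the while loop (fuel m*n+1 is a totality guard only; it is proved sufficient)
def pvBFSLoop (m n : Int) : Nat → List (Int × Int) → PySem.Set (Int × Int) → Int → Int
  | 0, _, _, step => step
  | fuel + 1, q, visit, step =>
    if q.isEmpty then step
    else
      let st := pvRound m n q visit
      pvBFSLoop m n fuel st.1 st.2 (step + 1)

def maxDistanceByBFS (grid : List (List Int)) : Int :=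
  let m : Int := PySem.List.len grid
  let n : Int := PySem.List.len (PySem.List.pyGetD grid 0 [])
  let st := pvInitA grid m n
  let step := pvBFSLoop m n (m.toNat * n.toNat + 1) st.1 st.2 0
  if step > 1 then step - 1 else -1

-- ===== PORT B =====
-- land = [(i, j) for i in range(m) for j in range(n) if grid[i][j] == 1]
def pvLand (grid : List (List Int)) (m n : Int) : List (Int × Int) :=
  (PySem.List.pyRange 0 m 1).foldl (fun acc i =>
    (PySem.List.pyRange 0 n 1).foldl (fun acc j =>
      if pvGridAt grid i j == 1 then acc ++ [(i, j)] else acc) acc) []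

-- min((abs(i-a) + abs(j-b) for a, b in land), default=-1)
def pvMinDist (land : List (Int × Int)) (i j : Int) : Int :=
  (PySem.List.min? (land.map (fun l => |i - l.1| + |j - l.2|)) (fun x => x)).getD (-1)

def maxDistanceByBFS_alt (grid : List (List Int)) : Int :=
  let m : Int := PySem.List.len grid
  let n : Int := PySem.List.len (PySem.List.pyGetD grid 0 [])
  let land := pvLand grid m n
  (PySem.List.pyRange 0 m 1).foldl (fun best i =>
    (PySem.List.pyRange 0 n 1).foldl (fun best j =>
      if !(pvGridAt grid i j == 1) then
        let d := pvMinDist land i j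
        if d > best then d else best
      else best) best) (-1)

-- ===== PRECONDITION & SPEC =====
-- Pre_ excludes exactly the inputs on which the Python A raises IndexError: the empty
-- grid (grid[0]) and grids in which some row is shorter than the first row.
def Pre_maxDistanceByBFS (grid : List (List Int)) : Prop :=
  grid ≠ [] ∧ ∀ row ∈ grid, (grid.headD []).length ≤ row.length
instance (grid : List (List Int)) : Decidable (Pre_maxDistanceByBFS grid) := by
  unfold Pre_maxDistanceByBFS; infer_instance

def pvWitness_maxDistanceByBFS : List (List Int) := [[1, 0], [0, 0]]

def Spec_maxDistanceByBFS (grid : List (List Int)) (out : Int) : Prop := out = maxDistanceByBFS_alt grid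
instance (grid : List (List Int)) (out : Int) : Decidable (Spec_maxDistanceByBFS grid out) := by unfold Spec_maxDistanceByBFS; infer_instance

-- ===== CLAIM (what is proved, stated in full; the proofs are below) =====
def Claim_equal_maxDistanceByBFS : Prop := ∀ (grid : List (List Int)), Dom_maxDistanceByBFS grid → Pre_maxDistanceByBFS grid → Spec_maxDistanceByBFS grid (maxDistanceByBFS grid)

-- ===== LEMMAS AND PROOFS =====

-- spec-side vocabulary (proof helpers only)
def pvIn (m n : Int) (c : Int × Int) : Prop :=
  0 ≤ c.1 ∧ c.1 < m ∧ 0 ≤ c.2 ∧ c.2 < n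

def pvAllCells (m n : Int) : List (Int × Int) :=
  (PySem.List.pyRange 0 m 1).flatMap (fun i => (PySem.List.pyRange 0 n 1).map (fun j => (i, j)))

def pvMd (c l : Int × Int) : Int := |c.1 - l.1| + |c.2 - l.2|

def pvDistL (L : List (Int × Int)) (c : Int × Int) : Int :=
  (PySem.List.min? (L.map (fun l => pvMd c l)) (fun x => x)).getD (-1)

lemma pvMinDist_eq (land : List (Int × Int)) (i j : Int) :
    pvMinDist land i j = pvDistL land (i, j) := rfl

lemma mem_pvAllCells {m n : Int} {c : Int × Int} :
    c ∈ pvAllCells m n ↔ pvIn m n c := by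
  constructor
  · intro h
    rcases List.mem_flatMap.mp h with ⟨i, hi, hj⟩
    rcases List.mem_map.mp hj with ⟨j, hjm, he⟩
    rw [PySem.List.mem_pyRange_one] at hi hjm
    subst he; exact ⟨hi.1, hi.2, hjm.1, hjm.2⟩
  · rintro ⟨h1, h2, h3, h4⟩
    refine List.mem_flatMap.mpr ⟨c.1, ?_, List.mem_map.mpr ⟨c.2, ?_, rfl⟩⟩
    · rw [PySem.List.mem_pyRange_one]; exact ⟨h1, h2⟩
    · rw [PySem.List.mem_pyRange_one]; exact ⟨h3, h4⟩

lemma pvIsValid_iff {m n x y : Int} : pvIsValid m n x y = true ↔ pvIn m n (x, y) := by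
  simp [pvIsValid, pvIn]; tauto

lemma pvMd_nonneg (c l : Int × Int) : 0 ≤ pvMd c l := by
  unfold pvMd; positivity

lemma pvMd_eq_zero_iff {c l : Int × Int} : pvMd c l = 0 ↔ c = l := by
  unfold pvMd
  rw [add_eq_zero_iff_of_nonneg (abs_nonneg _) (abs_nonneg _), abs_eq_zero, abs_eq_zero,
    sub_eq_zero, sub_eq_zero]
  constructor
  · rintro ⟨h1, h2⟩; exact Prod.ext h1 h2
  · rintro rfl; exact ⟨rfl, rfl⟩


lemma pvDistL_nil (c : Int × Int) : pvDistL [] c = -1 := rfl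

lemma pvDistL_exists {L : List (Int × Int)} (c : Int × Int) (hL : L ≠ []) :
    ∃ l ∈ L, pvDistL L c = pvMd c l := by
  cases hmin : PySem.List.min? (L.map (fun l => pvMd c l)) (fun x => x) with
  | none =>
    exact absurd (by simpa using (PySem.List.min?_eq_none_iff _ _).mp hmin) hL
  | some v =>
    rcases List.mem_map.mp (PySem.List.min?_mem hmin) with ⟨l, hl, he⟩
    exact ⟨l, hl, by simp [pvDistL, hmin, ← he]⟩

lemma pvDistL_le {L : List (Int × Int)} (c : Int × Int) :
    ∀ l ∈ L, pvDistL L c ≤ pvMd c l := by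
  intro l hl
  cases hmin : PySem.List.min? (L.map (fun l => pvMd c l)) (fun x => x) with
  | none =>
    have : L = [] := by simpa using (PySem.List.min?_eq_none_iff _ _).mp hmin
    simp [this] at hl
  | some v =>
    have := PySem.List.min?_isMin hmin (pvMd c l) (List.mem_map.mpr ⟨l, hl, rfl⟩)
    simpa [pvDistL, hmin] using this

lemma pvDistL_nonneg {L : List (Int × Int)} (c : Int × Int) (hL : L ≠ []) :
    0 ≤ pvDistL L c := by
  rcases pvDistL_exists c hL with ⟨l, _, he⟩
  exact he ▸ pvMd_nonneg c l

lemma pvDistL_eq_zero_iff {L : List (Int × Int)} (c : Int × Int) (hL : L ≠ []) :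
    pvDistL L c = 0 ↔ c ∈ L := by
  constructor
  · intro h
    rcases pvDistL_exists c hL with ⟨l, hl, he⟩
    have : c = l := pvMd_eq_zero_iff.mp (by omega)
    exact this ▸ hl
  · intro hc
    have h1 := pvDistL_le c c hc
    have h2 := pvDistL_nonneg c hL
    have h3 : pvMd c c = 0 := pvMd_eq_zero_iff.mpr rfl
    omega

lemma pvDistL_pos {L : List (Int × Int)} (c : Int × Int) (hL : L ≠ []) (hc : c ∉ L) :
    1 ≤ pvDistL L c := by
  have h1 := pvDistL_nonneg c hL
  have h2 : pvDistL L c ≠ 0 := fun h => hc ((pvDistL_eq_zero_iff c hL).mp h)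
  omega

lemma pvDirects_cases {d : Int × Int} (hd : d ∈ pvDirects) :
    d = (1, 0) ∨ d = (0, 1) ∨ d = (-1, 0) ∨ d = (0, -1) := by
  simpa [pvDirects] using hd

lemma pvMd_adj (c l d : Int × Int) (hd : d ∈ pvDirects) :
    pvMd (c.1 + d.1, c.2 + d.2) l ≤ pvMd c l + 1 := by
  have h1 : |c.1 + d.1 - l.1| ≤ |c.1 - l.1| + |d.1| := by
    have : c.1 + d.1 - l.1 = (c.1 - l.1) + d.1 := by ring
    rw [this]; exact abs_add_le _ _
  have h2 : |c.2 + d.2 - l.2| ≤ |c.2 - l.2| + |d.2| := by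
    have : c.2 + d.2 - l.2 = (c.2 - l.2) + d.2 := by ring
    rw [this]; exact abs_add_le _ _
  have h3 : |d.1| + |d.2| = 1 := by
    rcases pvDirects_cases hd with h | h | h | h <;> subst h <;> decide
  simp only [pvMd] at *
  omega

lemma pvDistL_adj {L : List (Int × Int)} (c d : Int × Int) (hL : L ≠ [])
    (hd : d ∈ pvDirects) :
    pvDistL L (c.1 + d.1, c.2 + d.2) ≤ pvDistL L c + 1 := by
  rcases pvDistL_exists c hL with ⟨l, hl, he⟩
  have := pvDistL_le (c.1 + d.1, c.2 + d.2) l hl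
  have := pvMd_adj c l d hd
  omega


lemma pvDistL_adj' {L : List (Int × Int)} (c d : Int × Int) (hL : L ≠ [])
    (hd : d ∈ pvDirects) :
    pvDistL L c ≤ pvDistL L (c.1 + d.1, c.2 + d.2) + 1 := by
  have hd' : ((-d.1, -d.2) : Int × Int) ∈ pvDirects := by
    rcases pvDirects_cases hd with h | h | h | h <;> subst h <;> decide
  have := pvDistL_adj (c.1 + d.1, c.2 + d.2) (-d.1, -d.2) hL hd'
  simpa using this

lemma pvAbsStep_lt {a b : Int} (h : a < b) : |a + 1 - b| + 1 = |a - b| := by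
  rw [abs_of_nonpos (by omega), abs_of_neg (by omega)]; omega

lemma pvAbsStep_gt {a b : Int} (h : b < a) : |a - 1 - b| + 1 = |a - b| := by
  rw [abs_of_nonneg (by omega), abs_of_pos (by omega)]; omega

lemma pvStepToward {m n : Int} {L : List (Int × Int)} (hL : L ≠ [])
    (hLC : ∀ l ∈ L, pvIn m n l) (c : Int × Int) (hc : pvIn m n c)
    (h1 : 1 ≤ pvDistL L c) :
    ∃ d ∈ pvDirects, pvIn m n (c.1 + d.1, c.2 + d.2) ∧
      pvDistL L (c.1 + d.1, c.2 + d.2) = pvDistL L c - 1 := by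
  rcases pvDistL_exists c hL with ⟨l, hl, he⟩
  have hIl := hLC l hl
  have hmd : 1 ≤ pvMd c l := he ▸ h1
  have hne : c ≠ l := by
    intro h; rw [pvMd_eq_zero_iff.mpr h] at hmd; omega
  obtain ⟨hc1, hc2, hc3, hc4⟩ := hc
  obtain ⟨hl1, hl2, hl3, hl4⟩ := hIl
  have key : ∃ d ∈ pvDirects, pvIn m n (c.1 + d.1, c.2 + d.2) ∧
      pvMd (c.1 + d.1, c.2 + d.2) l = pvMd c l - 1 := by
    rcases lt_trichotomy c.1 l.1 with hx | hx | hx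
    · refine ⟨(1, 0), by decide, ⟨by omega, by omega, by omega, by omega⟩, ?_⟩
      simp only [pvMd]
      rw [show c.2 + ((1, 0) : Int × Int).2 = c.2 from by ring]
      have := pvAbsStep_lt hx
      omega
    · rcases lt_trichotomy c.2 l.2 with hy | hy | hy
      · refine ⟨(0, 1), by decide, ⟨by omega, by omega, by omega, by omega⟩, ?_⟩
        simp only [pvMd]
        rw [show c.1 + ((0, 1) : Int × Int).1 = c.1 from by ring]
        have := pvAbsStep_lt hy
        omega
      · exact absurd (Prod.ext hx hy) hne
      · refine ⟨(0, -1), by decide, ⟨by omega, by omega, by omega, by omega⟩, ?_⟩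
        simp only [pvMd]
        rw [show c.1 + ((0, -1) : Int × Int).1 = c.1 from by ring,
          show c.2 + ((0, -1) : Int × Int).2 = c.2 - 1 from by ring]
        have := pvAbsStep_gt hy
        omega
    · refine ⟨(-1, 0), by decide, ⟨by omega, by omega, by omega, by omega⟩, ?_⟩
      simp only [pvMd]
      rw [show c.1 + ((-1, 0) : Int × Int).1 = c.1 - 1 from by ring,
        show c.2 + ((-1, 0) : Int × Int).2 = c.2 from by ring]
      have := pvAbsStep_gt hx
      omega
  rcases key with ⟨d, hd, hin, hmd'⟩
  refine ⟨d, hd, hin, ?_⟩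
  have le1 := pvDistL_le (c.1 + d.1, c.2 + d.2) l hl
  have ge1 := pvDistL_adj' c d hL hd
  omega


lemma pvNbrStep_spec {m n k : Int} {L : List (Int × Int)} (hL : L ≠ [])
    (x d : Int × Int) (hd : d ∈ pvDirects)
    (hx2 : pvDistL L x = k)
    (out : List (Int × Int)) (vis : PySem.Set (Int × Int))
    (hout : ∀ c ∈ out, pvIn m n c ∧ pvDistL L c = k + 1)
    (hvis : ∀ c, c ∈ vis ↔ (pvIn m n c ∧ pvDistL L c ≤ k) ∨ c ∈ out) :
    (∀ c ∈ (pvNbrStep m n x (out, vis) d).1, pvIn m n c ∧ pvDistL L c = k + 1) ∧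
    (∀ c, c ∈ (pvNbrStep m n x (out, vis) d).2 ↔
      (pvIn m n c ∧ pvDistL L c ≤ k) ∨ c ∈ (pvNbrStep m n x (out, vis) d).1) ∧
    (∀ c ∈ out, c ∈ (pvNbrStep m n x (out, vis) d).1) ∧
    (∀ c ∈ vis, c ∈ (pvNbrStep m n x (out, vis) d).2) ∧
    (pvIn m n (x.1 + d.1, x.2 + d.2) → (x.1 + d.1, x.2 + d.2) ∈ (pvNbrStep m n x (out, vis) d).2) := by
  unfold pvNbrStep
  by_cases hb : (pvIsValid m n (x.1 + d.1) (x.2 + d.2) && !(PySem.Set.contains vis (x.1 + d.1, x.2 + d.2))) = true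
  · simp only [hb, if_pos]
    have hvalid : pvIn m n (x.1 + d.1, x.2 + d.2) := by
      rcases Bool.and_eq_true_iff.mp hb with ⟨h1, _⟩
      exact pvIsValid_iff.mp h1
    have hnvis : (x.1 + d.1, x.2 + d.2) ∉ vis := by
      rcases Bool.and_eq_true_iff.mp hb with ⟨_, h2⟩
      intro hmem
      simp only [Bool.not_eq_true', PySem.Set.contains_eq_listContains] at h2
      exact absurd ((PySem.Set.contains_iff _ _).mpr hmem) (by simp_all)
    have hdist : pvDistL L (x.1 + d.1, x.2 + d.2) = k + 1 := by
      have hle : pvDistL L (x.1 + d.1, x.2 + d.2) ≤ k + 1 := by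
        have := pvDistL_adj x d hL hd; omega
      have hgt : ¬ ((pvIn m n (x.1 + d.1, x.2 + d.2) ∧
          pvDistL L (x.1 + d.1, x.2 + d.2) ≤ k) ∨ (x.1 + d.1, x.2 + d.2) ∈ out) := by
        intro h; exact hnvis ((hvis _).mpr h)
      push Not at hgt
      have := hgt.1 hvalid
      omega
    refine ⟨?_, ?_, ?_, ?_, ?_⟩
    · intro c hc
      rcases List.mem_append.mp hc with h | h
      · exact hout c h
      · rw [List.mem_singleton] at h; subst h; exact ⟨hvalid, hdist⟩
    · intro c
      rw [PySem.Set.mem_add, hvis c, List.mem_append, List.mem_singleton]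
      tauto
    · intro c hc; exact List.mem_append.mpr (Or.inl hc)
    · intro c hc; exact (PySem.Set.mem_add _ _ _).mpr (Or.inl hc)
    · intro _; exact (PySem.Set.mem_add _ _ _).mpr (Or.inr rfl)
  · rw [Bool.not_eq_true] at hb
    simp only [hb, Bool.false_eq_true, if_false]
    refine ⟨hout, hvis, fun c hc => hc, fun c hc => hc, ?_⟩
    intro hvalid
    rw [Bool.and_eq_false_iff] at hb
    rcases hb with h1 | h2
    · exact absurd (pvIsValid_iff.mpr hvalid) (by simp [h1])
    · rw [Bool.not_eq_false'] at h2
      exact (PySem.Set.contains_iff _ _).mp h2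

lemma pvCellFold_spec {m n k : Int} {L : List (Int × Int)} (hL : L ≠ [])
    (x : Int × Int) (hx2 : pvDistL L x = k)
    (ds : List (Int × Int)) (hds : ∀ d ∈ ds, d ∈ pvDirects) :
    ∀ (out : List (Int × Int)) (vis : PySem.Set (Int × Int)),
    (∀ c ∈ out, pvIn m n c ∧ pvDistL L c = k + 1) →
    (∀ c, c ∈ vis ↔ (pvIn m n c ∧ pvDistL L c ≤ k) ∨ c ∈ out) →
    (∀ c ∈ (ds.foldl (pvNbrStep m n x) (out, vis)).1, pvIn m n c ∧ pvDistL L c = k + 1) ∧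
    (∀ c, c ∈ (ds.foldl (pvNbrStep m n x) (out, vis)).2 ↔
      (pvIn m n c ∧ pvDistL L c ≤ k) ∨ c ∈ (ds.foldl (pvNbrStep m n x) (out, vis)).1) ∧
    (∀ c ∈ out, c ∈ (ds.foldl (pvNbrStep m n x) (out, vis)).1) ∧
    (∀ c ∈ vis, c ∈ (ds.foldl (pvNbrStep m n x) (out, vis)).2) ∧
    (∀ d ∈ ds, pvIn m n (x.1 + d.1, x.2 + d.2) →
      (x.1 + d.1, x.2 + d.2) ∈ (ds.foldl (pvNbrStep m n x) (out, vis)).2) := by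
  induction ds with
  | nil => intro out vis hout hvis; exact ⟨hout, hvis, fun c hc => hc, fun c hc => hc, by simp⟩
  | cons d ds ih =>
    intro out vis hout hvis
    have hd := hds d (List.mem_cons_self)
    have hstep := pvNbrStep_spec hL x d hd hx2 out vis hout hvis
    obtain ⟨h1, h2, h3, h4, h5⟩ := hstep
    have hds' : ∀ e ∈ ds, e ∈ pvDirects := fun e he => hds e (List.mem_cons_of_mem d he)
    have ihs := ih hds' (pvNbrStep m n x (out, vis) d).1 (pvNbrStep m n x (out, vis) d).2 h1 h2
    rw [List.foldl_cons]
    obtain ⟨g1, g2, g3, g4, g5⟩ := ihs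
    refine ⟨g1, g2, fun c hc => g3 c (h3 c hc), fun c hc => g4 c (h4 c hc), ?_⟩
    intro e he hvalid
    rcases List.mem_cons.mp he with rfl | he'
    · exact g4 _ (h5 hvalid)
    · exact g5 e he' hvalid

lemma pvRoundFold_spec {m n k : Int} {L : List (Int × Int)} (hL : L ≠ [])
    (q' : List (Int × Int)) (hq' : ∀ x ∈ q', pvIn m n x ∧ pvDistL L x = k) :
    ∀ (out : List (Int × Int)) (vis : PySem.Set (Int × Int)),
    (∀ c ∈ out, pvIn m n c ∧ pvDistL L c = k + 1) →
    (∀ c, c ∈ vis ↔ (pvIn m n c ∧ pvDistL L c ≤ k) ∨ c ∈ out) →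
    (∀ c ∈ (q'.foldl (fun st x => pvDirects.foldl (pvNbrStep m n x) st) (out, vis)).1,
        pvIn m n c ∧ pvDistL L c = k + 1) ∧
    (∀ c, c ∈ (q'.foldl (fun st x => pvDirects.foldl (pvNbrStep m n x) st) (out, vis)).2 ↔
      (pvIn m n c ∧ pvDistL L c ≤ k) ∨
        c ∈ (q'.foldl (fun st x => pvDirects.foldl (pvNbrStep m n x) st) (out, vis)).1) ∧
    (∀ c ∈ vis, c ∈ (q'.foldl (fun st x => pvDirects.foldl (pvNbrStep m n x) st) (out, vis)).2) ∧
    (∀ x ∈ q', ∀ d ∈ pvDirects, pvIn m n (x.1 + d.1, x.2 + d.2) →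
      (x.1 + d.1, x.2 + d.2) ∈
        (q'.foldl (fun st x => pvDirects.foldl (pvNbrStep m n x) st) (out, vis)).2) := by
  induction q' with
  | nil => intro out vis hout hvis; exact ⟨hout, hvis, fun c hc => hc, by simp⟩
  | cons x q' ih =>
    intro out vis hout hvis
    have hx := hq' x (List.mem_cons_self)
    have hcell := pvCellFold_spec hL x hx.2 pvDirects (fun d hd => hd) out vis hout hvis
    obtain ⟨h1, h2, _, h4, h5⟩ := hcell
    have hq'' : ∀ y ∈ q', pvIn m n y ∧ pvDistL L y = k :=
      fun y hy => hq' y (List.mem_cons_of_mem x hy)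
    rw [List.foldl_cons]
    have ihs := ih hq'' _ _ h1 h2
    obtain ⟨g1, g2, g3, g4⟩ := ihs
    refine ⟨g1, g2, fun c hc => g3 c (h4 c hc), ?_⟩
    intro y hy d hd hvalid
    rcases List.mem_cons.mp hy with rfl | hy'
    · exact g3 _ (h5 d hd hvalid)
    · exact g4 y hy' d hd hvalid


lemma pvRound_spec {m n k : Int} {L : List (Int × Int)} (hL : L ≠ [])
    (hLC : ∀ l ∈ L, pvIn m n l) (hk : 0 ≤ k)
    (q : List (Int × Int)) (visit : PySem.Set (Int × Int))
    (hq : ∀ c, c ∈ q ↔ pvIn m n c ∧ pvDistL L c = k)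
    (hv : ∀ c, c ∈ visit ↔ pvIn m n c ∧ pvDistL L c ≤ k) :
    (∀ c, c ∈ (pvRound m n q visit).1 ↔ pvIn m n c ∧ pvDistL L c = k + 1) ∧
    (∀ c, c ∈ (pvRound m n q visit).2 ↔ pvIn m n c ∧ pvDistL L c ≤ k + 1) := by
  have hfold := pvRoundFold_spec hL q (fun x hx => (hq x).mp hx) [] visit
    (by simp) (by intro c; simp [hv c])
  obtain ⟨h1, h2, h3, h4⟩ := hfold
  unfold pvRound
  have hA : ∀ c, c ∈ (q.foldl (fun st x => pvDirects.foldl (pvNbrStep m n x) st) ([], visit)).1 ↔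
      pvIn m n c ∧ pvDistL L c = k + 1 := by
    intro c
    constructor
    · exact h1 c
    · rintro ⟨hin, hdc⟩
      rcases pvStepToward hL hLC c hin (by omega) with ⟨d, hd, hvalid', hdist'⟩
      have hxq : (c.1 + d.1, c.2 + d.2) ∈ q := (hq _).mpr ⟨hvalid', by omega⟩
      have hd' : ((-d.1, -d.2) : Int × Int) ∈ pvDirects := by
        rcases pvDirects_cases hd with h | h | h | h <;> subst h <;> decide
      have heq : ((c.1 + d.1 + -d.1, c.2 + d.2 + -d.2) : Int × Int) = c := by simp
      have hin' : pvIn m n ((c.1 + d.1, c.2 + d.2).1 + -d.1, (c.1 + d.1, c.2 + d.2).2 + -d.2) := by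
        rw [show ((c.1 + d.1, c.2 + d.2).1 + -d.1, (c.1 + d.1, c.2 + d.2).2 + -d.2) =
          ((c.1 + d.1 + -d.1, c.2 + d.2 + -d.2) : Int × Int) from rfl, heq]
        exact hin
      have hmem := h4 _ hxq (-d.1, -d.2) hd' hin'
      rw [show ((c.1 + d.1, c.2 + d.2).1 + -d.1, (c.1 + d.1, c.2 + d.2).2 + -d.2) =
        ((c.1 + d.1 + -d.1, c.2 + d.2 + -d.2) : Int × Int) from rfl, heq] at hmem
      rcases (h2 c).mp hmem with ⟨_, hle⟩ | hout
      · omega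
      · exact hout
  refine ⟨hA, ?_⟩
  intro c
  rw [h2 c]
  constructor
  · rintro (⟨hin, hle⟩ | hout)
    · exact ⟨hin, by omega⟩
    · have := h1 c hout; exact ⟨this.1, by omega⟩
  · rintro ⟨hin, hle⟩
    by_cases hcase : pvDistL L c ≤ k
    · exact Or.inl ⟨hin, hcase⟩
    · exact Or.inr ((hA c).mpr ⟨hin, by omega⟩)

def pvD (m n : Int) (L : List (Int × Int)) : Int :=
  ((pvAllCells m n).map (pvDistL L)).foldl max 0

lemma pvD_nonneg (m n : Int) (L : List (Int × Int)) : 0 ≤ pvD m n L :=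
  (PySem.List.le_foldl_max _ _).1

lemma pvD_ge {m n : Int} {L : List (Int × Int)} (c : Int × Int) (hc : pvIn m n c) :
    pvDistL L c ≤ pvD m n L :=
  (PySem.List.le_foldl_max _ _).2 _ (List.mem_map.mpr ⟨c, mem_pvAllCells.mpr hc, rfl⟩)

lemma pvD_attained {m n : Int} {L : List (Int × Int)} (hL : L ≠ [])
    (hLC : ∀ l ∈ L, pvIn m n l) :
    ∃ c, pvIn m n c ∧ pvDistL L c = pvD m n L := by
  rcases PySem.List.foldl_max_mem ((pvAllCells m n).map (pvDistL L)) 0 with h | h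
  · cases L with
    | nil => exact absurd rfl hL
    | cons l L' =>
      refine ⟨l, hLC l List.mem_cons_self, ?_⟩
      rw [pvD, h]
      exact (pvDistL_eq_zero_iff l hL).mpr List.mem_cons_self
  · rcases List.mem_map.mp h with ⟨c, hc, he⟩
    exact ⟨c, mem_pvAllCells.mp hc, he⟩

lemma pvLayer_nonempty {m n : Int} {L : List (Int × Int)} (hL : L ≠ [])
    (hLC : ∀ l ∈ L, pvIn m n l) (k : Int) (h0 : 0 ≤ k) (hD : k ≤ pvD m n L) :
    ∃ c, pvIn m n c ∧ pvDistL L c = k := by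
  have main : ∀ j : Nat, ∀ k : Int, k = pvD m n L - j → 0 ≤ k →
      ∃ c, pvIn m n c ∧ pvDistL L c = k := by
    intro j
    induction j with
    | zero =>
      intro k hk _
      have : k = pvD m n L := by push_cast at hk; omega
      exact this ▸ pvD_attained hL hLC
    | succ j ih =>
      intro k hk h0'
      have hk1 : k + 1 = pvD m n L - j := by push_cast at hk ⊢; omega
      rcases ih (k + 1) hk1 (by omega) with ⟨c, hc1, hc2⟩
      rcases pvStepToward hL hLC c hc1 (by omega) with ⟨d, _, hvalid, hdist⟩
      exact ⟨_, hvalid, by omega⟩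
  exact main (pvD m n L - k).toNat k (by omega) h0

lemma pvLoop_spec {m n : Int} {L : List (Int × Int)} (hL : L ≠ [])
    (hLC : ∀ l ∈ L, pvIn m n l) :
    ∀ (fuel : Nat) (k : Int) (q : List (Int × Int)) (visit : PySem.Set (Int × Int)),
    0 ≤ k → k ≤ pvD m n L + 1 → (pvD m n L + 1 - k).toNat ≤ fuel →
    (∀ c, c ∈ q ↔ pvIn m n c ∧ pvDistL L c = k) →
    (∀ c, c ∈ visit ↔ pvIn m n c ∧ pvDistL L c ≤ k) →
    pvBFSLoop m n fuel q visit k = pvD m n L + 1 := by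
  intro fuel
  induction fuel with
  | zero =>
    intro k q visit h0 h1 h2 hq hv
    simp only [pvBFSLoop]
    omega
  | succ f ih =>
    intro k q visit h0 h1 h2 hq hv
    by_cases hk : k ≤ pvD m n L
    · rcases pvLayer_nonempty hL hLC k h0 hk with ⟨c, hc1, hc2⟩
      have hcq : c ∈ q := (hq c).mpr ⟨hc1, hc2⟩
      have hqne : q.isEmpty = false := by
        cases q with
        | nil => simp at hcq
        | cons _ _ => rfl
      simp only [pvBFSLoop, hqne, Bool.false_eq_true, if_false]
      have hr := pvRound_spec hL hLC h0 q visit hq hv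
      exact ih (k + 1) _ _ (by omega) (by omega) (by omega) hr.1 hr.2
    · have hqe : q = [] := by
        cases q with
        | nil => rfl
        | cons c q' =>
          have hm := (hq c).mp List.mem_cons_self
          have := pvD_ge (L := L) c hm.1
          omega
      subst hqe
      simp only [pvBFSLoop, List.isEmpty_nil, if_true]
      omega


lemma pvIfMax (b d : Int) : (if d > b then d else b) = max b d := by
  split_ifs <;> omega

lemma pvFoldlMax_le {l : List (Int × Int)} (f : Int × Int → Int) {M init : Int}
    (h1 : init ≤ M) (h2 : ∀ x ∈ l, f x ≤ M) :
    l.foldl (fun b x => max b (f x)) init ≤ M := by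
  induction l generalizing init with
  | nil => simpa using h1
  | cons x l ih =>
    rw [List.foldl_cons]
    exact ih (max_le h1 (h2 x List.mem_cons_self)) (fun y hy => h2 y (List.mem_cons_of_mem x hy))

lemma pvLand_eq (grid : List (List Int)) (m n : Int) :
    pvLand grid m n = (PySem.List.pyRange 0 m 1).flatMap (fun i =>
      ((PySem.List.pyRange 0 n 1).filter (fun j => pvGridAt grid i j == 1)).map
        (fun j => ((i, j) : Int × Int))) := by
  unfold pvLand
  rw [PySem.List.foldl_congr_mem _ _
    (fun acc i => acc ++ ((PySem.List.pyRange 0 n 1).filter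
      (fun j => pvGridAt grid i j == 1)).map (fun j => ((i, j) : Int × Int))) _
    (fun acc i _ => PySem.List.foldl_append_if _ _ _ _)]
  rw [PySem.List.foldl_append_eq_flatMap]
  simp

lemma mem_pvLand {grid : List (List Int)} {m n : Int} {c : Int × Int} :
    c ∈ pvLand grid m n ↔ pvIn m n c ∧ pvGridAt grid c.1 c.2 = 1 := by
  rw [pvLand_eq]
  simp only [List.mem_flatMap, List.mem_map, List.mem_filter, PySem.List.mem_pyRange_one]
  constructor
  · rintro ⟨i, hi, j, ⟨⟨hj, hcond⟩, he⟩⟩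
    subst he
    exact ⟨⟨hi.1, hi.2, hj.1, hj.2⟩, by simpa using hcond⟩
  · rintro ⟨⟨h1, h2, h3, h4⟩, hcond⟩
    exact ⟨c.1, ⟨h1, h2⟩, c.2, ⟨⟨⟨h3, h4⟩, by simpa using hcond⟩, rfl⟩⟩

def pvWater (grid : List (List Int)) (m n : Int) : List (Int × Int) :=
  (PySem.List.pyRange 0 m 1).flatMap (fun i =>
    ((PySem.List.pyRange 0 n 1).filter (fun j => !(pvGridAt grid i j == 1))).map
      (fun j => ((i, j) : Int × Int)))

lemma mem_pvWater {grid : List (List Int)} {m n : Int} {c : Int × Int} :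
    c ∈ pvWater grid m n ↔ pvIn m n c ∧ pvGridAt grid c.1 c.2 ≠ 1 := by
  unfold pvWater
  simp only [List.mem_flatMap, List.mem_map, List.mem_filter, PySem.List.mem_pyRange_one]
  constructor
  · rintro ⟨i, hi, j, ⟨⟨hj, hcond⟩, he⟩⟩
    subst he
    exact ⟨⟨hi.1, hi.2, hj.1, hj.2⟩, by simpa using hcond⟩
  · rintro ⟨⟨h1, h2, h3, h4⟩, hcond⟩
    exact ⟨c.1, ⟨h1, h2⟩, c.2, ⟨⟨⟨h3, h4⟩, by simpa using hcond⟩, rfl⟩⟩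

lemma pvInitA_spec (grid : List (List Int)) (m n : Int) :
    (pvInitA grid m n).1 = pvLand grid m n ∧
    (∀ c, c ∈ (pvInitA grid m n).2 ↔ c ∈ pvLand grid m n) := by
  unfold pvInitA pvLand
  have inner : ∀ (i : Int) (l : List Int) (a : List (Int × Int)) (s : PySem.Set (Int × Int)),
      (∀ c, c ∈ s ↔ c ∈ a) →
      (l.foldl (fun st j => if pvGridAt grid i j == 1 then
          (st.1 ++ [((i, j) : Int × Int)], PySem.Set.add st.2 (i, j)) else st) (a, s)).1 =
        l.foldl (fun acc j => if pvGridAt grid i j == 1 then acc ++ [((i, j) : Int × Int)] else acc) a ∧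
      (∀ c, c ∈ (l.foldl (fun st j => if pvGridAt grid i j == 1 then
          (st.1 ++ [((i, j) : Int × Int)], PySem.Set.add st.2 (i, j)) else st) (a, s)).2 ↔
        c ∈ l.foldl (fun acc j => if pvGridAt grid i j == 1 then acc ++ [((i, j) : Int × Int)] else acc) a) := by
    intro i l
    induction l with
    | nil => intro a s hs; exact ⟨rfl, hs⟩
    | cons j l ih =>
      intro a s hs
      rw [List.foldl_cons, List.foldl_cons]
      by_cases hc : (pvGridAt grid i j == 1) = true
      · simp only [hc, if_true]
        exact ih (a ++ [(i, j)]) (PySem.Set.add s (i, j))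
          (fun c => by rw [PySem.Set.mem_add, hs c, List.mem_append, List.mem_singleton])
      · rw [Bool.not_eq_true] at hc
        simp only [hc, Bool.false_eq_true, if_false]
        exact ih a s hs
  have outer : ∀ (rows : List Int) (a : List (Int × Int)) (s : PySem.Set (Int × Int)),
      (∀ c, c ∈ s ↔ c ∈ a) →
      (rows.foldl (fun st i => (PySem.List.pyRange 0 n 1).foldl (fun st j =>
          if pvGridAt grid i j == 1 then (st.1 ++ [((i, j) : Int × Int)], PySem.Set.add st.2 (i, j)) else st) st) (a, s)).1 =
        rows.foldl (fun acc i => (PySem.List.pyRange 0 n 1).foldl (fun acc j =>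
          if pvGridAt grid i j == 1 then acc ++ [((i, j) : Int × Int)] else acc) acc) a ∧
      (∀ c, c ∈ (rows.foldl (fun st i => (PySem.List.pyRange 0 n 1).foldl (fun st j =>
          if pvGridAt grid i j == 1 then (st.1 ++ [((i, j) : Int × Int)], PySem.Set.add st.2 (i, j)) else st) st) (a, s)).2 ↔
        c ∈ rows.foldl (fun acc i => (PySem.List.pyRange 0 n 1).foldl (fun acc j =>
          if pvGridAt grid i j == 1 then acc ++ [((i, j) : Int × Int)] else acc) acc) a) := by
    intro rows
    induction rows with
    | nil => intro a s hs; exact ⟨rfl, hs⟩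
    | cons i rows ih =>
      intro a s hs
      rw [List.foldl_cons, List.foldl_cons]
      rcases inner i (PySem.List.pyRange 0 n 1) a s hs with ⟨h1, h2⟩
      have := ih _ _ h2
      rw [← Prod.mk.eta (p := (PySem.List.pyRange 0 n 1).foldl _ (a, s))]
      rw [h1]
      exact this
  exact outer (PySem.List.pyRange 0 m 1) [] PySem.Set.empty (by simp [PySem.Set.empty])

lemma pvAlt_eq (grid : List (List Int)) :
    maxDistanceByBFS_alt grid =
      (pvWater grid (PySem.List.len grid) (PySem.List.len (PySem.List.pyGetD grid 0 []))).foldl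
        (fun b c => max b (pvDistL (pvLand grid (PySem.List.len grid)
          (PySem.List.len (PySem.List.pyGetD grid 0 []))) c)) (-1) := by
  simp only [maxDistanceByBFS_alt]
  rw [PySem.List.foldl_congr_mem _ _
    (fun best i => (((PySem.List.pyRange 0 (PySem.List.len (PySem.List.pyGetD grid 0 [])) 1).filter
      (fun j => !(pvGridAt grid i j == 1))).map
        (fun j => ((i, j) : Int × Int))).foldl
      (fun b c => max b (pvDistL (pvLand grid (PySem.List.len grid)
        (PySem.List.len (PySem.List.pyGetD grid 0 []))) c)) best) _ ?_]
  · rw [← List.foldl_flatMap]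
    rfl
  · intro best i _
    beta_reduce
    rw [List.foldl_map]
    rw [PySem.List.foldl_if_eq_foldl_filter (fun j => !(pvGridAt grid i j == 1))
      (fun best j => if pvMinDist (pvLand grid (PySem.List.len grid)
        (PySem.List.len (PySem.List.pyGetD grid 0 []))) i j > best
        then pvMinDist (pvLand grid (PySem.List.len grid)
          (PySem.List.len (PySem.List.pyGetD grid 0 []))) i j else best)]
    exact PySem.List.foldl_congr_mem _ _ _ _
      (fun acc x _ => by rw [pvIfMax, pvMinDist_eq])


lemma pvMain (grid : List (List Int)) : maxDistanceByBFS grid = maxDistanceByBFS_alt grid := by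
  rw [pvAlt_eq]
  simp only [maxDistanceByBFS]
  set m := PySem.List.len grid with hm
  set n := PySem.List.len (PySem.List.pyGetD grid 0 []) with hn
  set L := pvLand grid m n with hLdef
  obtain ⟨hq0, hv0⟩ := pvInitA_spec grid m n
  by_cases hL : L = []
  · have hloop : pvBFSLoop m n (m.toNat * n.toNat + 1) (pvInitA grid m n).1 (pvInitA grid m n).2 0 = 0 := by
      rw [hq0, ← hLdef, hL]
      simp only [pvBFSLoop, List.isEmpty_nil, if_true]
    rw [hloop]
    have hB : (pvWater grid m n).foldl (fun b c => max b (pvDistL L c)) (-1) = -1 := by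
      have h1 := (PySem.List.le_foldl_max_int (pvWater grid m n) (pvDistL L) (-1)).1
      have h2 := pvFoldlMax_le (l := pvWater grid m n) (pvDistL L)
        (le_refl (-1)) (fun c _ => by rw [hL]; exact le_of_eq (pvDistL_nil c))
      omega
    rw [hB]
    norm_num
  · have hLC : ∀ l ∈ L, pvIn m n l := fun l hl => (mem_pvLand.mp hl).1
    obtain ⟨l0, hl0⟩ := List.exists_mem_of_ne_nil L hL
    obtain ⟨ha, hb, hc, hd⟩ := hLC l0 hl0
    have hD0 := pvD_nonneg m n L
    obtain ⟨cD, hcD1, hcD2⟩ := pvD_attained hL hLC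
    have hDb : pvD m n L ≤ m + n - 2 := by
      rcases pvDistL_exists cD hL with ⟨l, hl, he⟩
      obtain ⟨he1, he2, he3, he4⟩ := hLC l hl
      obtain ⟨hf1, hf2, hf3, hf4⟩ := hcD1
      have h1 : |cD.1 - l.1| ≤ m - 1 := abs_le.mpr ⟨by omega, by omega⟩
      have h2 : |cD.2 - l.2| ≤ n - 1 := abs_le.mpr ⟨by omega, by omega⟩
      rw [← hcD2, he]
      unfold pvMd
      omega
    have hfuel : (pvD m n L + 1 - 0).toNat ≤ m.toNat * n.toNat + 1 := by
      have hP : m + n - 1 ≤ m * n := by nlinarith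
      rw [← Int.toNat_mul (by omega) (by omega)]
      omega
    have hq : ∀ c, c ∈ (pvInitA grid m n).1 ↔ pvIn m n c ∧ pvDistL L c = 0 := by
      intro c
      rw [hq0]
      constructor
      · intro hcl; exact ⟨hLC c hcl, (pvDistL_eq_zero_iff c hL).mpr hcl⟩
      · rintro ⟨_, h0⟩; exact (pvDistL_eq_zero_iff c hL).mp h0
    have hv : ∀ c, c ∈ (pvInitA grid m n).2 ↔ pvIn m n c ∧ pvDistL L c ≤ 0 := by
      intro c
      rw [hv0 c]
      have := pvDistL_nonneg c hL
      constructor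
      · intro hcl; exact ⟨hLC c hcl, by rw [(pvDistL_eq_zero_iff c hL).mpr hcl]⟩
      · rintro ⟨_, h0⟩; exact (pvDistL_eq_zero_iff c hL).mp (by omega)
    have hloop := pvLoop_spec hL hLC (m.toNat * n.toNat + 1) 0 (pvInitA grid m n).1
      (pvInitA grid m n).2 (le_refl 0) (by omega) hfuel hq hv
    rw [hloop]
    by_cases hD1 : 1 ≤ pvD m n L
    · rw [if_pos (by omega)]
      have hub : (pvWater grid m n).foldl (fun b c => max b (pvDistL L c)) (-1) ≤ pvD m n L :=
        pvFoldlMax_le (pvDistL L) (by omega)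
          (fun c hcm => pvD_ge c (mem_pvWater.mp hcm).1)
      have hcw : cD ∈ pvWater grid m n := by
        refine mem_pvWater.mpr ⟨hcD1, fun hg => ?_⟩
        have hcl : cD ∈ L := mem_pvLand.mpr ⟨hcD1, hg⟩
        have := (pvDistL_eq_zero_iff cD hL).mpr hcl
        omega
      have hlb := (PySem.List.le_foldl_max_int (pvWater grid m n)
        (pvDistL L) (-1)).2 cD hcw
      rw [hcD2] at hlb
      omega
    · rw [if_neg (by omega)]
      have hwe : pvWater grid m n = [] := by
        rw [List.eq_nil_iff_forall_not_mem]
        intro c hcm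
        rcases mem_pvWater.mp hcm with ⟨hcin, hcg⟩
        have hnotL : c ∉ L := fun hcl => hcg (mem_pvLand.mp hcl).2
        have := pvDistL_pos c hL hnotL
        have := pvD_ge (L := L) c hcin
        omega
      rw [hwe]
      rfl

-- ===== VERDICT (by name: the statement is the Claim_ definition above) =====
theorem maxDistanceByBFS_spec : Claim_equal_maxDistanceByBFS := by
  intro grid _ _
  unfold Spec_maxDistanceByBFS
  exact pvMain grid
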